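-- pv_equiv track=rewrite | github.com/s7-esKim/BJstudy | 유광석/BJ_KS_2578.py | check_bingo
-- ===== SOURCE A (Python) =====
-- def check(li):
--     b = 0
--     # 가로
--     for i in li:
--         xb = 0
--         for j in i:
--             xb += j
--         if xb == 0:
--             b += 1
--     # 세로
--     for i in range(5):
--         yb = 0
--         for j in range(5):
--             yb += li[j][i]
--         if yb == 0:
--             b += 1
--     # 대각선
--     c_x = 0
--     c_y = 0
--     for i in range(5):
--         c_x += li[i][i]
--         c_y += li[i][-i-1]      # 인덱스 -순회로 뒤부터
--     if c_x == 0: b += 1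
--     if c_y == 0: b += 1
--
--     return b
--
-- def check_bingo(li1, li2):
--     cnt = 0                     # 정답용 카운트
--     for i in range(5):
--         for j in range(5):
--             cnt += 1
--             for k in range(5):
--                 for l in range(5):
--                     if li2[i][j] == li1[k][l]:  # 사회자꺼가 철수꺼에 있으면 0으로 바꿈
--                         li1[k][l] = 0
--             clear = check(li1)                  # 0으로 바꾸고 빙고가 몇개 있는지 확인
--             if clear >= 3:
--
--                 return cnt
-- ===== SOURCE B (Python) =====
-- def check_bingo(li1, li2):
--     # Return value only; does not mutate li1 (A zeroes matched cells in place).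
--     rows = [sum(r) for r in li1]
--     cols = [sum(li1[k][c] for k in range(5)) for c in range(5)]
--     d1 = sum(li1[k][k] for k in range(5))
--     d2 = sum(li1[k][4 - k] for k in range(5))
--     pos = {}
--     for k in range(5):
--         for l in range(5):
--             pos.setdefault(li1[k][l], []).append((k, l))
--     seen = set()
--     cnt = 0
--     for row in li2:
--         for v in row:
--             cnt += 1
--             if v not in seen:
--                 seen.add(v)
--                 for k, l in pos.get(v, []):
--                     rows[k] -= v
--                     cols[l] -= v
--                     if k == l:
--                         d1 -= v
--                     if k + l == 4:
--                         d2 -= v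
--             if rows.count(0) + cols.count(0) + (d1 == 0) + (d2 == 0) >= 3:
--                 return cnt
-- ===== Notes on version B (the rewrite author's own statement) =====
-- stated objective: alternative
-- what changed: B precomputes a value->positions dict and the 12 line sums (5 rows, 5 columns, 2 diagonals) once, then processes each announced number incrementally: for a not-yet-seen value it decrements only the line sums of its indexed positions and tests how many of the 12 sums are zero, instead of A's per-move 25x25 scan-and-zero of the board followed by a full check() pass over all lines; B does not mutate li1.
import Mathlib
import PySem

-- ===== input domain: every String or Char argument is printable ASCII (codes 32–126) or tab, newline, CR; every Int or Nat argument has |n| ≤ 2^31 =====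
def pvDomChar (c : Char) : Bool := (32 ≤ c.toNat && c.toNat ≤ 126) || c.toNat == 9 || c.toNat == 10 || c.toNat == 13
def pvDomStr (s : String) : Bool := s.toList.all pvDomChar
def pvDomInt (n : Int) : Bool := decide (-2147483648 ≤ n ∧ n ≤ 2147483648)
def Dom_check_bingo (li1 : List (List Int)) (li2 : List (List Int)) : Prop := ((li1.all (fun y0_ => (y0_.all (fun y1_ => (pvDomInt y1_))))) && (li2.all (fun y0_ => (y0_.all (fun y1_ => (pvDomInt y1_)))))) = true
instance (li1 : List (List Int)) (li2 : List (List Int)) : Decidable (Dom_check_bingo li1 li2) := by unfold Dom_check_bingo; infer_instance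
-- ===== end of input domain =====

-- B indexes each value's board positions once and maintains the 12 line sums incrementally
-- instead of A's per-move 25×25 scan-and-zero plus full check() pass;
-- A mutates li1 in place, B does not: the equivalence proved here is about the RETURN value only.

-- ===== PORT A =====
-- helper 'check' of A: counts lines (5 rows, 5 columns, 2 diagonals) summing to 0
def pyCheck (li : List (List Int)) : Int :=
  let b : Int := li.foldl (fun b i => if i.foldl (fun xb j => xb + j) 0 == 0 then b + 1 else b) 0
  let b := (PySem.List.pyRange 0 5 1).foldl (fun b i =>
    if (PySem.List.pyRange 0 5 1).foldl (fun yb j => yb + PySem.List.pyGetD (PySem.List.pyGetD li j []) i 0) 0 == 0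
    then b + 1 else b) b
  let c := (PySem.List.pyRange 0 5 1).foldl (fun (c : Int × Int) i =>
    (c.1 + PySem.List.pyGetD (PySem.List.pyGetD li i []) i 0,
     c.2 + PySem.List.pyGetD (PySem.List.pyGetD li i []) (-i - 1) 0)) (0, 0)
  let b := if c.1 == 0 then b + 1 else b
  let b := if c.2 == 0 then b + 1 else b
  b

-- A's inner double loop: 'for k: for l: if v == li1[k][l]: li1[k][l] = 0'
def zeroPassA (v : Int) (b0 : List (List Int)) : List (List Int) :=
  (PySem.List.pyRange 0 5 1).foldl (fun b k =>
    (PySem.List.pyRange 0 5 1).foldl (fun b l =>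
      if v == PySem.List.pyGetD (PySem.List.pyGetD b k []) l 0
      then PySem.List.pySetD b k (PySem.List.pySetD (PySem.List.pyGetD b k []) l 0)
      else b) b) b0

-- A's main double loop with early return, over the flattened (i, j) pairs
def goA (li2 : List (List Int)) : List (Int × Int) → Int → List (List Int) → Option Int
  | [], _, _ => none
  | ij :: rest, cnt, li1 =>
    let cnt := cnt + 1
    let li1 := zeroPassA (PySem.List.pyGetD (PySem.List.pyGetD li2 ij.1 []) ij.2 0) li1
    if pyCheck li1 ≥ 3 then some cnt else goA li2 rest cnt li1

def check_bingo (li1 : List (List Int)) (li2 : List (List Int)) : Option Int :=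
  goA li2 ((PySem.List.pyRange 0 5 1).flatMap (fun i => (PySem.List.pyRange 0 5 1).map (fun j => (i, j)))) 0 li1

-- ===== PORT B =====
-- inner loop 'for k, l in pos.get(v, []): rows[k] -= v; cols[l] -= v; …' on the state (rows, cols, d1, d2)
def stepB (v : Int) (pl : List (Int × Int)) (st : List Int × List Int × Int × Int) :
    List Int × List Int × Int × Int :=
  pl.foldl (fun st p =>
    (PySem.List.pySetD st.1 p.1 (PySem.List.pyGetD st.1 p.1 0 - v),
     PySem.List.pySetD st.2.1 p.2 (PySem.List.pyGetD st.2.1 p.2 0 - v),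
     (if p.1 == p.2 then st.2.2.1 - v else st.2.2.1),
     (if p.1 + p.2 == 4 then st.2.2.2 - v else st.2.2.2))) st

-- 'rows.count(0) + cols.count(0) + (d1 == 0) + (d2 == 0) >= 3'
def tB (rows cols : List Int) (d1 d2 : Int) : Bool :=
  decide (3 ≤ (PySem.List.count rows 0 : Int) + (PySem.List.count cols 0 : Int)
      + (if d1 == 0 then (1 : Int) else 0) + (if d2 == 0 then (1 : Int) else 0))

-- 'for row in li2: for v in row: …' with the early return, over the flattened values
def goB (pos : PySem.Dict Int (List (Int × Int))) :
    List Int → Int → PySem.Set Int → List Int → List Int → Int → Int → Option Int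
  | [], _, _, _, _, _, _ => none
  | v :: rest, cnt, seen, rows, cols, d1, d2 =>
    if PySem.Set.contains seen v then
      if tB rows cols d1 d2 then some (cnt + 1)
      else goB pos rest (cnt + 1) seen rows cols d1 d2
    else
      let st := stepB v (PySem.Dict.getD pos v []) (rows, cols, d1, d2)
      if tB st.1 st.2.1 st.2.2.1 st.2.2.2 then some (cnt + 1)
      else goB pos rest (cnt + 1) (PySem.Set.add seen v) st.1 st.2.1 st.2.2.1 st.2.2.2

-- 'pos.setdefault(li1[k][l], []).append((k, l))' over the 5×5 grid
def posOf (li1 : List (List Int)) : PySem.Dict Int (List (Int × Int)) :=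
  (PySem.List.pyRange 0 5 1).foldl (fun d k =>
    (PySem.List.pyRange 0 5 1).foldl (fun d l =>
      PySem.Dict.modify d (PySem.List.pyGetD (PySem.List.pyGetD li1 k []) l 0) [] (· ++ [(k, l)])) d)
    PySem.Dict.empty

def check_bingo_alt (li1 : List (List Int)) (li2 : List (List Int)) : Option Int :=
  goB (posOf li1) (li2.flatMap (fun r => r)) 0 PySem.Set.empty
    (li1.map (fun r => r.sum))
    ((PySem.List.pyRange 0 5 1).map (fun c =>
      ((PySem.List.pyRange 0 5 1).map (fun k => PySem.List.pyGetD (PySem.List.pyGetD li1 k []) c 0)).sum))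
    ((PySem.List.pyRange 0 5 1).map (fun k => PySem.List.pyGetD (PySem.List.pyGetD li1 k []) k 0)).sum
    ((PySem.List.pyRange 0 5 1).map (fun k => PySem.List.pyGetD (PySem.List.pyGetD li1 k []) (4 - k) 0)).sum

-- ===== PRECONDITION & SPEC =====
-- Pre_ restricts to the task's natural domain, 5×5 bingo boards. A also happens to return on some
-- oversized/ragged boards (extra rows and row tails silently feed check()'s sums and negative
-- diagonal indices); those are outside the task's domain.
def Pre_check_bingo (li1 : List (List Int)) (li2 : List (List Int)) : Prop :=
  li1.length = 5 ∧ (∀ r ∈ li1, r.length = 5) ∧ li2.length = 5 ∧ (∀ r ∈ li2, r.length = 5)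
instance (li1 : List (List Int)) (li2 : List (List Int)) : Decidable (Pre_check_bingo li1 li2) := by
  unfold Pre_check_bingo; infer_instance
def pvWitness_check_bingo : List (List Int) × List (List Int) :=
  ([[1, 2, 3, 4, 5], [6, 7, 8, 9, 10], [11, 12, 13, 14, 15], [16, 17, 18, 19, 20], [21, 22, 23, 24, 25]],
   [[1, 2, 3, 4, 5], [6, 7, 8, 9, 10], [11, 12, 13, 14, 15], [16, 17, 18, 19, 20], [21, 22, 23, 24, 25]])

def Spec_check_bingo (li1 : List (List Int)) (li2 : List (List Int)) (out : Option Int) : Prop :=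
  out = check_bingo_alt li1 li2
instance (li1 : List (List Int)) (li2 : List (List Int)) (out : Option Int) : Decidable (Spec_check_bingo li1 li2 out) := by
  unfold Spec_check_bingo; infer_instance

-- ===== CLAIM (what is proved, stated in full; the proofs are below) =====
def Claim_equal_check_bingo : Prop := ∀ (li1 : List (List Int)) (li2 : List (List Int)),
  Dom_check_bingo li1 li2 → Pre_check_bingo li1 li2 → Spec_check_bingo li1 li2 (check_bingo li1 li2)

-- ===== LEMMAS AND PROOFS =====

-- masked board: cell ↦ 0 once its value has been announced
def mOf (seen : PySem.Set Int) (x : Int) : Int := if PySem.Set.contains seen x then 0 else x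
def maskRow (seen : PySem.Set Int) (row : List Int) : List Int := row.map (mOf seen)
def mB (li1 : List (List Int)) (seen : PySem.Set Int) : List (List Int) := li1.map (maskRow seen)

-- the 12 line aggregates of a board, in check()'s shapes
def rowsL (b : List (List Int)) : List Int := b.map (fun r => r.foldl (fun s x => s + x) 0)
def colsL (b : List (List Int)) : List Int :=
  (PySem.List.pyRange 0 5 1).map (fun c =>
    (PySem.List.pyRange 0 5 1).foldl (fun s k => s + PySem.List.pyGetD (PySem.List.pyGetD b k []) c 0) 0)
def d1L (b : List (List Int)) : Int :=
  (PySem.List.pyRange 0 5 1).foldl (fun s k => s + PySem.List.pyGetD (PySem.List.pyGetD b k []) k 0) 0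
def d2L (b : List (List Int)) : Int :=
  (PySem.List.pyRange 0 5 1).foldl (fun s k => s + PySem.List.pyGetD (PySem.List.pyGetD b k []) (4 - k) 0) 0
def linesB (b : List (List Int)) : List Int := rowsL b ++ colsL b ++ [d1L b, d2L b]

-- common reference recursion: both ports compute this
def goM (li1 : List (List Int)) : List Int → Int → PySem.Set Int → Option Int
  | [], _, _ => none
  | v :: rest, cnt, seen =>
    let s' := PySem.Set.add seen v
    if tB (rowsL (mB li1 s')) (colsL (mB li1 s')) (d1L (mB li1 s')) (d2L (mB li1 s')) then some (cnt + 1)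
    else goM li1 rest (cnt + 1) s'

-- ---------- A-side: goA on a masked board is goM ----------

def rowStep (v : Int) (r : List Int) (l : Int) : List Int :=
  if v == PySem.List.pyGetD r l 0 then PySem.List.pySetD r l 0 else r

lemma inner_general (v k : Int) :
    ∀ (ls : List Int) (b : List (List Int)), 0 ≤ k → k < (b.length : Int) → ∀ (r : List Int),
    ls.foldl (fun b l => if v == PySem.List.pyGetD (PySem.List.pyGetD b k []) l 0
        then PySem.List.pySetD b k (PySem.List.pySetD (PySem.List.pyGetD b k []) l 0) else b)
      (PySem.List.pySetD b k r)
    = PySem.List.pySetD b k (ls.foldl (rowStep v) r) := by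
  intro ls
  induction ls with
  | nil => intro b hk hk2 r; rfl
  | cons l ls ih =>
    intro b hk hk2 r
    have hlen : k.toNat < b.length := by omega
    have hget : PySem.List.pyGetD (PySem.List.pySetD b k r) k [] = r := by
      rw [PySem.List.pySetD_of_nonneg b r hk,
          PySem.List.pyGetD_eq_getElem _ _ hk (by simp; omega)]
      simp
    have hset : ∀ r', PySem.List.pySetD (PySem.List.pySetD b k r) k r'
        = PySem.List.pySetD b k r' := by
      intro r'
      rw [PySem.List.pySetD_of_nonneg b r hk, PySem.List.pySetD_of_nonneg _ r' hk,
          PySem.List.pySetD_of_nonneg b r' hk, List.set_set]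
    rw [List.foldl_cons, List.foldl_cons]
    by_cases hc : v == PySem.List.pyGetD r l 0
    · simp only [hget, hc, if_pos, hset, rowStep]
      exact ih b hk hk2 _
    · simp only [hget, rowStep, hc, Bool.false_eq_true, if_false]
      exact ih b hk hk2 r

lemma set_app2 (pre s : List (List Int)) (x c : List Int) :
    (pre ++ x :: s).set pre.length c = pre ++ c :: s := by simp

lemma zero_general (v : Int) : ∀ (suf pre : List (List Int)),
    (PySem.List.pyRange (pre.length : Int) ((pre.length : Int) + suf.length) 1).foldl
      (fun b k => (PySem.List.pyRange 0 5 1).foldl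
        (fun b l => if v == PySem.List.pyGetD (PySem.List.pyGetD b k []) l 0
          then PySem.List.pySetD b k (PySem.List.pySetD (PySem.List.pyGetD b k []) l 0) else b) b)
      (pre ++ suf)
    = pre ++ suf.map (fun r => (PySem.List.pyRange 0 5 1).foldl (rowStep v) r) := by
  intro suf
  induction suf with
  | nil => intro pre; simp [PySem.List.pyRange_one_eq_nil]
  | cons r s ih =>
    intro pre
    have hlt : (pre.length : Int) < (pre.length : Int) + ((r :: s).length : Int) := by
      simp only [List.length_cons]; push_cast; omega
    rw [PySem.List.pyRange_one_cons hlt, List.foldl_cons]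
    have hinit : pre ++ r :: s = PySem.List.pySetD (pre ++ r :: s) (pre.length : Int) r := by
      rw [PySem.List.pySetD_natCast, set_app2]
    have hstep : (PySem.List.pyRange 0 5 1).foldl
        (fun b l => if v == PySem.List.pyGetD (PySem.List.pyGetD b (pre.length : Int) []) l 0
          then PySem.List.pySetD b (pre.length : Int)
            (PySem.List.pySetD (PySem.List.pyGetD b (pre.length : Int) []) l 0) else b)
        (pre ++ r :: s)
        = pre ++ ((PySem.List.pyRange 0 5 1).foldl (rowStep v) r) :: s := by
      conv_lhs => rw [hinit]
      rw [inner_general v (pre.length : Int) _ _ (by positivity) (by simp only [List.length_append, List.length_cons]; push_cast; omega) r]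
      rw [PySem.List.pySetD_natCast, set_app2]
    rw [hstep]
    have e1 : pre ++ ((PySem.List.pyRange 0 5 1).foldl (rowStep v) r) :: s
        = (pre ++ [(PySem.List.pyRange 0 5 1).foldl (rowStep v) r]) ++ s := by simp
    have e2 : (pre.length : Int) + 1
        = (((pre ++ [(PySem.List.pyRange 0 5 1).foldl (rowStep v) r]).length : Int)) := by
      simp only [List.length_append, List.length_cons, List.length_nil]; push_cast; ring
    have e3 : (pre.length : Int) + ((r :: s).length : Int)
        = ((pre ++ [(PySem.List.pyRange 0 5 1).foldl (rowStep v) r]).length : Int) + (s.length : Int) := by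
      simp only [List.length_append, List.length_cons, List.length_nil]; push_cast; ring
    rw [e1]
    rw [e2]
    rw [e3]
    rw [ih (pre ++ [(PySem.List.pyRange 0 5 1).foldl (rowStep v) r])]
    simp

lemma cell_mask (v x : Int) (seen : PySem.Set Int) :
    (if v == mOf seen x then 0 else mOf seen x) = mOf (PySem.Set.add seen v) x := by
  unfold mOf
  by_cases hs : PySem.Set.contains seen x <;>
    simp_all [PySem.Set.mem_add, beq_iff_eq] <;>
    by_cases hv : x = v <;> simp_all [eq_comm]

lemma getD_app (pre s : List Int) (x : Int) : (pre ++ x :: s).getD pre.length 0 = x := by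
  simp [List.getD_eq_getElem?_getD]

lemma set_app (pre s : List Int) (x c : Int) : (pre ++ x :: s).set pre.length c = pre ++ c :: s := by
  simp

lemma rowFull_general (v : Int) : ∀ (suf pre : List Int),
    (PySem.List.pyRange (pre.length : Int) ((pre.length : Int) + suf.length) 1).foldl (rowStep v) (pre ++ suf)
      = pre ++ suf.map (fun x => if v == x then 0 else x) := by
  intro suf
  induction suf with
  | nil => intro pre; simp [PySem.List.pyRange_one_eq_nil]
  | cons x s ih =>
    intro pre
    have hlt : (pre.length : Int) < (pre.length : Int) + ((x :: s).length : Int) := by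
      simp only [List.length_cons]; push_cast; omega
    rw [PySem.List.pyRange_one_cons hlt, List.foldl_cons]
    have hstep : rowStep v (pre ++ x :: s) (pre.length : Int)
        = pre ++ (if v == x then 0 else x) :: s := by
      unfold rowStep
      rw [PySem.List.pyGetD_natCast, getD_app, PySem.List.pySetD_natCast, set_app]
      split <;> rfl
    rw [hstep]
    have e1 : pre ++ (if v == x then 0 else x) :: s = (pre ++ [if v == x then 0 else x]) ++ s := by simp
    have e2 : (pre.length : Int) + 1 = ((pre ++ [if v == x then 0 else x]).length : Int) := by
      simp only [List.length_append, List.length_cons, List.length_nil]; push_cast; ring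
    have e3 : (pre.length : Int) + ((x :: s).length : Int)
        = ((pre ++ [if v == x then 0 else x]).length : Int) + (s.length : Int) := by
      simp only [List.length_append, List.length_cons, List.length_nil]; push_cast; ring
    rw [e1, e2, e3, ih (pre ++ [if v == x then 0 else x])]
    simp

lemma rowFull_of_len5 (v : Int) (r : List Int) (h : r.length = 5) :
    (PySem.List.pyRange 0 5 1).foldl (rowStep v) r = r.map (fun x => if v == x then 0 else x) := by
  have := rowFull_general v r []
  simpa [h] using this

lemma zeroPassA_eq_map (v : Int) (b : List (List Int)) (h1 : b.length = 5) :
    zeroPassA v b = b.map (fun r => (PySem.List.pyRange 0 5 1).foldl (rowStep v) r) := by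
  have := zero_general v b []
  simpa [zeroPassA, h1] using this

lemma zeroPassA_mask (li1 : List (List Int)) (h1 : li1.length = 5) (h2 : ∀ r ∈ li1, r.length = 5)
    (v : Int) (seen : PySem.Set Int) :
    zeroPassA v (mB li1 seen) = mB li1 (PySem.Set.add seen v) := by
  unfold mB
  rw [zeroPassA_eq_map v _ (by simp [h1]), List.map_map]
  apply List.map_congr_left
  intro r hr
  have hlen : (maskRow seen r).length = 5 := by simp [maskRow, h2 r hr]
  simp only [Function.comp_def]
  rw [rowFull_of_len5 _ _ hlen]
  simp only [maskRow, List.map_map, Function.comp_def]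
  exact List.map_congr_left fun x _ => cell_mask v x seen

lemma diag_idx (row : List Int) (hlen : row.length = 5) (i : Int) (h0 : 0 ≤ i) (h5 : i < 5) :
    PySem.List.pyGetD row (-i - 1) 0 = PySem.List.pyGetD row (4 - i) 0 := by
  interval_cases i <;> simp [pysem, hlen]

lemma pyCheck_eq_lines (b : List (List Int)) (h1 : b.length = 5) (h2 : ∀ r ∈ b, r.length = 5) :
    pyCheck b = (linesB b).foldl (fun acc s => acc + if s == 0 then 1 else 0) (0 : Int) := by
  have hdiag : (PySem.List.pyRange 0 5 1).foldl
      (fun a i => a + PySem.List.pyGetD (PySem.List.pyGetD b i []) (-i - 1) 0) 0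
      = (PySem.List.pyRange 0 5 1).foldl
      (fun a i => a + PySem.List.pyGetD (PySem.List.pyGetD b i []) (4 - i) 0) 0 := by
    apply PySem.List.foldl_congr_mem
    intro acc i hi
    rw [PySem.List.mem_pyRange_one] at hi
    have hrow : PySem.List.pyGetD b i [] ∈ b :=
      PySem.List.pyGetD_mem b [] (by constructor <;> omega)
    rw [diag_idx _ (h2 _ hrow) i hi.1 hi.2]
  simp only [pyCheck, linesB, rowsL, colsL, d1L, d2L]
  rw [PySem.List.foldl_prod_mk
        (f := fun a i => a + PySem.List.pyGetD (PySem.List.pyGetD b i []) i 0)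
        (g := fun a i => a + PySem.List.pyGetD (PySem.List.pyGetD b i []) (-i - 1) 0)]
  rw [List.foldl_append, List.foldl_append]
  rw [PySem.List.foldl_if_add_one (p := fun i : List Int => i.foldl (fun xb j => xb + j) 0 == 0),
      PySem.List.foldl_if_add_one
        (p := fun i : Int => (PySem.List.pyRange 0 5 1).foldl (fun yb j => yb + PySem.List.pyGetD (PySem.List.pyGetD b j []) i 0) 0 == 0)]
  simp only [List.foldl_map]
  rw [PySem.List.foldl_add (g := fun row : List Int => if row.foldl (fun s x => s + x) 0 == 0 then 1 else 0)]
  rw [PySem.List.foldl_add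
        (g := fun c : Int => if (PySem.List.pyRange 0 5 1).foldl (fun s k => s + PySem.List.pyGetD (PySem.List.pyGetD b k []) c 0) 0 == 0 then 1 else 0)]
  rw [PySem.List.sum_map_ite_one_zero, PySem.List.sum_map_ite_one_zero]
  simp only [List.foldl_cons, List.foldl_nil, hdiag]
  split_ifs <;> ring

lemma lines_count (b : List (List Int)) :
    (linesB b).foldl (fun acc s => acc + if s == 0 then 1 else 0) (0 : Int)
      = (PySem.List.count (rowsL b) 0 : Int) + (PySem.List.count (colsL b) 0 : Int)
        + (if d1L b == 0 then (1 : Int) else 0) + (if d2L b == 0 then (1 : Int) else 0) := by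
  unfold linesB
  rw [PySem.List.foldl_add (g := fun s : Int => if s == 0 then 1 else 0),
      PySem.List.sum_map_ite_one_zero]
  simp only [List.countP_append, List.countP_cons, List.countP_nil, PySem.List.count_eq,
    List.count_eq_countP]
  by_cases hd1 : d1L b == 0 <;> by_cases hd2 : d2L b == 0 <;>
    simp [hd1, hd2] <;> push_cast <;> ring

lemma pyCheck_tB (b : List (List Int)) (h1 : b.length = 5) (h2 : ∀ r ∈ b, r.length = 5) :
    (pyCheck b ≥ 3) ↔ (tB (rowsL b) (colsL b) (d1L b) (d2L b) = true) := by
  rw [pyCheck_eq_lines b h1 h2, lines_count]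
  simp [tB, ge_iff_le]

lemma goA_eq_goM (li1 li2 : List (List Int)) (h1 : li1.length = 5) (h2 : ∀ r ∈ li1, r.length = 5) :
    ∀ (ijs : List (Int × Int)) (cnt : Int) (seen : PySem.Set Int),
      goA li2 ijs cnt (mB li1 seen)
        = goM li1 (ijs.map (fun ij => PySem.List.pyGetD (PySem.List.pyGetD li2 ij.1 []) ij.2 0)) cnt seen := by
  intro ijs
  induction ijs with
  | nil => intro cnt seen; rfl
  | cons ij rest ih =>
    intro cnt seen
    simp only [goA, goM, List.map_cons]
    rw [zeroPassA_mask li1 h1 h2 _ seen]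
    have hb1 : (mB li1 (PySem.Set.add seen (PySem.List.pyGetD (PySem.List.pyGetD li2 ij.1 []) ij.2 0))).length = 5 := by
      simp [mB, h1]
    have hb2 : ∀ r ∈ mB li1 (PySem.Set.add seen (PySem.List.pyGetD (PySem.List.pyGetD li2 ij.1 []) ij.2 0)), r.length = 5 := by
      intro r hr; simp only [mB, List.mem_map] at hr; obtain ⟨a, ha, rfl⟩ := hr
      simp [maskRow, h2 a ha]
    by_cases hc : pyCheck (mB li1 (PySem.Set.add seen (PySem.List.pyGetD (PySem.List.pyGetD li2 ij.1 []) ij.2 0))) ≥ 3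
    · rw [if_pos hc, if_pos ((pyCheck_tB _ hb1 hb2).mp hc)]
    · rw [if_neg hc, if_neg (fun h => hc ((pyCheck_tB _ hb1 hb2).mpr h))]
      exact ih (cnt + 1) _

-- ---------- B-side: goB with the incremental state is goM ----------

lemma stepB_split (v : Int) (pl : List (Int × Int)) (r c : List Int) (x y : Int) :
    stepB v pl (r, c, x, y)
      = (pl.foldl (fun s p => PySem.List.pySetD s p.1 (PySem.List.pyGetD s p.1 0 - v)) r,
         pl.foldl (fun s p => PySem.List.pySetD s p.2 (PySem.List.pyGetD s p.2 0 - v)) c,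
         pl.foldl (fun s p => if p.1 == p.2 then s - v else s) x,
         pl.foldl (fun s p => if p.1 + p.2 == 4 then s - v else s) y) := by
  induction pl generalizing r c x y with
  | nil => rfl
  | cons p pl ih => simp only [stepB, List.foldl_cons] at *; rw [ih]

-- a value's positions, per the dict index
def cellsOf (li1 : List (List Int)) : List (Int × (Int × Int)) :=
  (PySem.List.pyRange 0 5 1).flatMap (fun k =>
    (PySem.List.pyRange 0 5 1).map (fun l => (PySem.List.pyGetD (PySem.List.pyGetD li1 k []) l 0, (k, l))))

lemma foldl_flatMap' {α β σ : Type} (g : α → List β) (f : σ → β → σ) :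
    ∀ (l : List α) (i : σ), (l.flatMap g).foldl f i = l.foldl (fun a x => (g x).foldl f a) i := by
  intro l
  induction l with
  | nil => intro i; rfl
  | cons a l ih => intro i; simp [List.flatMap_cons, List.foldl_append, ih]

lemma posOf_eq (li1 : List (List Int)) :
    posOf li1 = (cellsOf li1).foldl (fun d p => PySem.Dict.modify d p.1 [] (· ++ [p.2])) PySem.Dict.empty := by
  unfold posOf cellsOf
  rw [foldl_flatMap']
  simp [List.foldl_map]

lemma P_eq (li1 : List (List Int)) (v : Int) :
    PySem.Dict.getD (posOf li1) v []
      = ((cellsOf li1).filter (fun p => p.1 == v)).map (fun p => p.2) := by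
  rw [posOf_eq, PySem.Dict.getD_foldl_modify_append]
  simp

-- the column positions in one row holding value v
def Lf (q : List Int) (v : Int) : List Int :=
  (PySem.List.pyRange 0 5 1).filter (fun l => PySem.List.pyGetD q l 0 == v)

lemma list5 {α : Type} (l : List α) (h : l.length = 5) : ∃ a b c d e, l = [a, b, c, d, e] := by
  match l, h with
  | [a, b, c, d, e], _ => exact ⟨a, b, c, d, e, rfl⟩

lemma cells5 (q0 q1 q2 q3 q4 : List Int) :
    cellsOf [q0, q1, q2, q3, q4]
      = ((PySem.List.pyRange 0 5 1).map (fun l => (PySem.List.pyGetD q0 l 0, ((0 : Int), l))))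
        ++ ((PySem.List.pyRange 0 5 1).map (fun l => (PySem.List.pyGetD q1 l 0, ((1 : Int), l))))
        ++ ((PySem.List.pyRange 0 5 1).map (fun l => (PySem.List.pyGetD q2 l 0, ((2 : Int), l))))
        ++ ((PySem.List.pyRange 0 5 1).map (fun l => (PySem.List.pyGetD q3 l 0, ((3 : Int), l))))
        ++ ((PySem.List.pyRange 0 5 1).map (fun l => (PySem.List.pyGetD q4 l 0, ((4 : Int), l)))) := by
  rfl

lemma P5 (q0 q1 q2 q3 q4 : List Int) (v : Int) :
    PySem.Dict.getD (posOf [q0, q1, q2, q3, q4]) v []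
      = (Lf q0 v).map (fun l => ((0 : Int), l)) ++ (Lf q1 v).map (fun l => ((1 : Int), l))
        ++ (Lf q2 v).map (fun l => ((2 : Int), l)) ++ (Lf q3 v).map (fun l => ((3 : Int), l))
        ++ (Lf q4 v).map (fun l => ((4 : Int), l)) := by
  rw [P_eq, cells5]
  simp only [List.filter_append, List.filter_map, List.map_append, List.map_map]
  rfl

lemma rowsBlock (v k : Int) (hk0 : 0 ≤ k) :
    ∀ {α : Type} (l : List α) (rs : List Int), k < (rs.length : Int) →
    l.foldl (fun rs (_ : α) => PySem.List.pySetD rs k (PySem.List.pyGetD rs k 0 - v)) rs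
      = PySem.List.pySetD rs k (PySem.List.pyGetD rs k 0 - v * l.length) := by
  intro α l
  induction l with
  | nil =>
    intro rs hk
    have hget := PySem.List.pyGetD_eq_getElem rs (0 : Int) hk0 hk
    simp only [List.foldl_nil, List.length_nil, Nat.cast_zero, mul_zero, sub_zero]
    rw [PySem.List.pySetD_of_nonneg _ _ hk0, hget, List.set_getElem_self]
  | cons a l ih =>
    intro rs hk
    have hget : ∀ x : Int, PySem.List.pyGetD (PySem.List.pySetD rs k x) k 0 = x := by
      intro x
      rw [PySem.List.pySetD_of_nonneg _ _ hk0]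
      have hb : k < ((rs.set k.toNat x).length : Int) := by simpa using hk
      rw [PySem.List.pyGetD_eq_getElem _ _ hk0 hb]
      simp [List.getElem_set]
    have hset : ∀ x y : Int, PySem.List.pySetD (PySem.List.pySetD rs k x) k y
        = PySem.List.pySetD rs k y := by
      intro x y
      rw [PySem.List.pySetD_of_nonneg _ _ hk0, PySem.List.pySetD_of_nonneg _ _ hk0,
          PySem.List.pySetD_of_nonneg _ _ hk0, List.set_set]
    rw [List.foldl_cons,
        ih (PySem.List.pySetD rs k (PySem.List.pyGetD rs k 0 - v))
          (by simpa [PySem.List.length_pySetD] using hk),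
        hget, hset]
    congr 1
    simp only [List.length_cons]
    push_cast
    ring

lemma colBlock (p : Int → Bool) (v c0 c1 c2 c3 c4 : Int) :
    ((PySem.List.pyRange 0 5 1).filter p).foldl
      (fun cs l => PySem.List.pySetD cs l (PySem.List.pyGetD cs l 0 - v)) [c0, c1, c2, c3, c4]
    = [if p 0 then c0 - v else c0, if p 1 then c1 - v else c1, if p 2 then c2 - v else c2,
       if p 3 then c3 - v else c3, if p 4 then c4 - v else c4] := by
  rw [List.foldl_filter]
  by_cases h0 : p 0 <;> by_cases h1 : p 1 <;> by_cases h2 : p 2 <;> by_cases h3 : p 3 <;>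
    by_cases h4 : p 4 <;>
    simp only [show PySem.List.pyRange 0 5 1 = [0, 1, 2, 3, 4] from rfl, List.foldl_cons,
      List.foldl_nil, h0, h1, h2, h3, h4, Bool.false_eq_true, if_true, if_false] <;>
    rfl

lemma foldl_ite_sub {α : Type} (p : α → Bool) (v : Int) :
    ∀ (l : List α) (d : Int), l.foldl (fun d x => if p x then d - v else d) d
      = d - v * (l.countP p : Int) := by
  intro l
  induction l with
  | nil => intro d; simp
  | cons a l ih =>
    intro d
    by_cases h : p a <;> simp [h, ih] <;> ring

lemma cellId (seen : PySem.Set Int) (v : Int) (hv : PySem.Set.contains seen v = false) (a : Int) :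
    mOf (PySem.Set.add seen v) a = mOf seen a - v * (if a == v then 1 else 0) := by
  have hadd : PySem.Set.add seen v = seen ++ [v] := by
    unfold PySem.Set.add
    rw [if_neg (by simp only [hv]; simp)]
  unfold mOf
  by_cases hav : a = v
  · subst hav
    have hc : PySem.Set.contains (seen ++ [a]) a = true := by
      simp [PySem.Set.contains]
    rw [hadd, hc, hv]
    simp
  · have hc : PySem.Set.contains (seen ++ [v]) a = PySem.Set.contains seen a := by
      simp [PySem.Set.contains, hav]
    rw [hadd, hc]
    have hbe : (a == v) = false := by simp [hav]
    rw [hbe]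
    by_cases hs : PySem.Set.contains seen a <;> simp [hs]


lemma maskSum (seen : PySem.Set Int) (v : Int) (hv : PySem.Set.contains seen v = false) :
    ∀ (q : List Int), (maskRow (PySem.Set.add seen v) q).sum
      = (maskRow seen q).sum - v * (List.count v q : Int) := by
  intro q
  induction q with
  | nil => simp [maskRow]
  | cons a q ih =>
    simp only [maskRow, List.map_cons, List.sum_cons, List.count_cons] at *
    rw [cellId seen v hv a, ih]
    by_cases h : a == v <;> simp [h] <;> ring

lemma Lcount (q : List Int) (hq : q.length = 5) (v : Int) :
    ((Lf q v).length : Int) = (List.count v q : Int) := by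
  unfold Lf
  have h5 : PySem.List.pyRange 0 5 1 = PySem.List.pyRange 0 (PySem.List.len q) 1 := by
    simp [PySem.List.len, hq]
  rw [h5, ← List.countP_eq_length_filter,
      show (fun l => PySem.List.pyGetD q l 0 == v)
        = ((fun x => x == v) ∘ (fun l => PySem.List.pyGetD q l 0)) from rfl,
      ← List.countP_map, PySem.List.map_pyGetD_pyRange_zero, ← List.count_eq_countP]

lemma getD_mask (seen : PySem.Set Int) (q : List Int) (c : Int) :
    PySem.List.pyGetD (maskRow seen q) c 0 = mOf seen (PySem.List.pyGetD q c 0) := by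
  have h0 : mOf seen 0 = 0 := by simp [mOf]
  unfold maskRow
  conv_lhs => rw [show (0 : Int) = mOf seen 0 from h0.symm]
  rw [PySem.List.pyGetD_map (mOf seen) q c 0]

lemma rowsChain (v : Int) (l0 l1 l2 l3 l4 : List Int) (a b c d e : Int) :
    l4.foldl (fun rs _ => PySem.List.pySetD rs 4 (PySem.List.pyGetD rs 4 0 - v))
      (l3.foldl (fun rs _ => PySem.List.pySetD rs 3 (PySem.List.pyGetD rs 3 0 - v))
        (l2.foldl (fun rs _ => PySem.List.pySetD rs 2 (PySem.List.pyGetD rs 2 0 - v))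
          (l1.foldl (fun rs _ => PySem.List.pySetD rs 1 (PySem.List.pyGetD rs 1 0 - v))
            (l0.foldl (fun rs _ => PySem.List.pySetD rs 0 (PySem.List.pyGetD rs 0 0 - v))
              [a, b, c, d, e]))))
      = [a - v * (l0.length : Int), b - v * (l1.length : Int), c - v * (l2.length : Int), d - v * (l3.length : Int), e - v * (l4.length : Int)] := by
  rw [rowsBlock v 0 (by norm_num) l0 [a, b, c, d, e] (by simp),
      show PySem.List.pySetD [a, b, c, d, e] 0 (PySem.List.pyGetD [a, b, c, d, e] 0 0 - v * (l0.length : Int)) = [a - v * (l0.length : Int), b, c, d, e] from rfl]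
  rw [rowsBlock v 1 (by norm_num) l1 [a - v * (l0.length : Int), b, c, d, e] (by simp),
      show PySem.List.pySetD [a - v * (l0.length : Int), b, c, d, e] 1 (PySem.List.pyGetD [a - v * (l0.length : Int), b, c, d, e] 1 0 - v * (l1.length : Int)) = [a - v * (l0.length : Int), b - v * (l1.length : Int), c, d, e] from rfl]
  rw [rowsBlock v 2 (by norm_num) l2 [a - v * (l0.length : Int), b - v * (l1.length : Int), c, d, e] (by simp),
      show PySem.List.pySetD [a - v * (l0.length : Int), b - v * (l1.length : Int), c, d, e] 2 (PySem.List.pyGetD [a - v * (l0.length : Int), b - v * (l1.length : Int), c, d, e] 2 0 - v * (l2.length : Int)) = [a - v * (l0.length : Int), b - v * (l1.length : Int), c - v * (l2.length : Int), d, e] from rfl]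
  rw [rowsBlock v 3 (by norm_num) l3 [a - v * (l0.length : Int), b - v * (l1.length : Int), c - v * (l2.length : Int), d, e] (by simp),
      show PySem.List.pySetD [a - v * (l0.length : Int), b - v * (l1.length : Int), c - v * (l2.length : Int), d, e] 3 (PySem.List.pyGetD [a - v * (l0.length : Int), b - v * (l1.length : Int), c - v * (l2.length : Int), d, e] 3 0 - v * (l3.length : Int)) = [a - v * (l0.length : Int), b - v * (l1.length : Int), c - v * (l2.length : Int), d - v * (l3.length : Int), e] from rfl]
  rw [rowsBlock v 4 (by norm_num) l4 [a - v * (l0.length : Int), b - v * (l1.length : Int), c - v * (l2.length : Int), d - v * (l3.length : Int), e] (by simp),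
      show PySem.List.pySetD [a - v * (l0.length : Int), b - v * (l1.length : Int), c - v * (l2.length : Int), d - v * (l3.length : Int), e] 4 (PySem.List.pyGetD [a - v * (l0.length : Int), b - v * (l1.length : Int), c - v * (l2.length : Int), d - v * (l3.length : Int), e] 4 0 - v * (l4.length : Int)) = [a - v * (l0.length : Int), b - v * (l1.length : Int), c - v * (l2.length : Int), d - v * (l3.length : Int), e - v * (l4.length : Int)] from rfl]

lemma sub_ind (b : Bool) (X v : Int) :
    (if b = true then X - v else X) = X - v * (if b = true then 1 else 0) := by
  cases b <;> simp

lemma step_crux (li1 : List (List Int)) (h1 : li1.length = 5) (h2 : ∀ r ∈ li1, r.length = 5)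
    (seen : PySem.Set Int) (v : Int) (hv : PySem.Set.contains seen v = false) :
    stepB v (PySem.Dict.getD (posOf li1) v [])
        (rowsL (mB li1 seen), colsL (mB li1 seen), d1L (mB li1 seen), d2L (mB li1 seen))
      = (rowsL (mB li1 (PySem.Set.add seen v)), colsL (mB li1 (PySem.Set.add seen v)),
         d1L (mB li1 (PySem.Set.add seen v)), d2L (mB li1 (PySem.Set.add seen v))) := by
  obtain ⟨q0, q1, q2, q3, q4, rfl⟩ := list5 li1 h1
  have hq0 : q0.length = 5 := h2 _ (by simp)
  have hq1 : q1.length = 5 := h2 _ (by simp)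
  have hq2 : q2.length = 5 := h2 _ (by simp)
  have hq3 : q3.length = 5 := h2 _ (by simp)
  have hq4 : q4.length = 5 := h2 _ (by simp)
  have hrowsL : ∀ S : PySem.Set Int, rowsL (mB [q0, q1, q2, q3, q4] S)
      = [(maskRow S q0).foldl (fun s x => s + x) 0, (maskRow S q1).foldl (fun s x => s + x) 0,
         (maskRow S q2).foldl (fun s x => s + x) 0, (maskRow S q3).foldl (fun s x => s + x) 0,
         (maskRow S q4).foldl (fun s x => s + x) 0] := fun S => rfl
  have hcolsL : ∀ S : PySem.Set Int, colsL (mB [q0, q1, q2, q3, q4] S)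
      = [
        0 + PySem.List.pyGetD (maskRow S q0) (0 : Int) 0 + PySem.List.pyGetD (maskRow S q1) (0 : Int) 0 + PySem.List.pyGetD (maskRow S q2) (0 : Int) 0 + PySem.List.pyGetD (maskRow S q3) (0 : Int) 0 + PySem.List.pyGetD (maskRow S q4) (0 : Int) 0, 
        0 + PySem.List.pyGetD (maskRow S q0) (1 : Int) 0 + PySem.List.pyGetD (maskRow S q1) (1 : Int) 0 + PySem.List.pyGetD (maskRow S q2) (1 : Int) 0 + PySem.List.pyGetD (maskRow S q3) (1 : Int) 0 + PySem.List.pyGetD (maskRow S q4) (1 : Int) 0, 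
        0 + PySem.List.pyGetD (maskRow S q0) (2 : Int) 0 + PySem.List.pyGetD (maskRow S q1) (2 : Int) 0 + PySem.List.pyGetD (maskRow S q2) (2 : Int) 0 + PySem.List.pyGetD (maskRow S q3) (2 : Int) 0 + PySem.List.pyGetD (maskRow S q4) (2 : Int) 0, 
        0 + PySem.List.pyGetD (maskRow S q0) (3 : Int) 0 + PySem.List.pyGetD (maskRow S q1) (3 : Int) 0 + PySem.List.pyGetD (maskRow S q2) (3 : Int) 0 + PySem.List.pyGetD (maskRow S q3) (3 : Int) 0 + PySem.List.pyGetD (maskRow S q4) (3 : Int) 0, 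
        0 + PySem.List.pyGetD (maskRow S q0) (4 : Int) 0 + PySem.List.pyGetD (maskRow S q1) (4 : Int) 0 + PySem.List.pyGetD (maskRow S q2) (4 : Int) 0 + PySem.List.pyGetD (maskRow S q3) (4 : Int) 0 + PySem.List.pyGetD (maskRow S q4) (4 : Int) 0] := fun S => rfl
  have hd1 : ∀ S : PySem.Set Int, d1L (mB [q0, q1, q2, q3, q4] S)
      = 0 + PySem.List.pyGetD (maskRow S q0) 0 0 + PySem.List.pyGetD (maskRow S q1) 1 0 + PySem.List.pyGetD (maskRow S q2) 2 0
        + PySem.List.pyGetD (maskRow S q3) 3 0 + PySem.List.pyGetD (maskRow S q4) 4 0 := fun S => rfl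
  have hd2 : ∀ S : PySem.Set Int, d2L (mB [q0, q1, q2, q3, q4] S)
      = 0 + PySem.List.pyGetD (maskRow S q0) (4 - 0) 0 + PySem.List.pyGetD (maskRow S q1) (4 - 1) 0
        + PySem.List.pyGetD (maskRow S q2) (4 - 2) 0 + PySem.List.pyGetD (maskRow S q3) (4 - 3) 0
        + PySem.List.pyGetD (maskRow S q4) (4 - 4) 0 := fun S => rfl
  have hrow : ∀ q : List Int, (maskRow (PySem.Set.add seen v) q).foldl (fun s x => s + x) 0
      = (maskRow seen q).foldl (fun s x => s + x) 0 - v * (List.count v q : Int) := by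
    intro q
    rw [← List.sum_eq_foldl, ← List.sum_eq_foldl]
    exact maskSum seen v hv q
  rw [P5, stepB_split]
  simp only [Prod.mk.injEq]
  refine ⟨?_, ?_, ?_, ?_⟩
  · -- rows
    simp only [List.foldl_append, List.foldl_map]
    rw [hrowsL seen, rowsChain, hrowsL (PySem.Set.add seen v)]
    rw [hrow q0, hrow q1, hrow q2, hrow q3, hrow q4]
    rw [Lcount q0 hq0 v, Lcount q1 hq1 v, Lcount q2 hq2 v, Lcount q3 hq3 v, Lcount q4 hq4 v]
  · -- cols
    simp only [List.foldl_append, List.foldl_map, Lf]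
    rw [hcolsL seen]
    rw [colBlock, colBlock, colBlock, colBlock, colBlock]
    rw [hcolsL (PySem.Set.add seen v)]
    simp only [sub_ind, getD_mask, cellId seen v hv, List.cons.injEq, and_true]
    refine ⟨?_, ?_, ?_, ?_, ?_⟩ <;> ring
  · -- d1
    simp only [List.foldl_append]
    rw [foldl_ite_sub, foldl_ite_sub, foldl_ite_sub, foldl_ite_sub, foldl_ite_sub]
    rw [hd1 seen, hd1 (PySem.Set.add seen v)]
    simp only [getD_mask, cellId seen v hv]
    simp [List.countP_map, Lf, List.countP_filter,
      show PySem.List.pyRange 0 5 1 = [0, 1, 2, 3, 4] from rfl, List.countP_cons, List.countP_nil]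
    push_cast
    ring
  · -- d2
    simp only [List.foldl_append]
    rw [foldl_ite_sub, foldl_ite_sub, foldl_ite_sub, foldl_ite_sub, foldl_ite_sub]
    rw [hd2 seen, hd2 (PySem.Set.add seen v)]
    simp only [getD_mask, cellId seen v hv]
    simp [List.countP_map, Lf, List.countP_filter,
      show PySem.List.pyRange 0 5 1 = [0, 1, 2, 3, 4] from rfl, List.countP_cons, List.countP_nil]
    push_cast
    ring

lemma add_of_contains (seen : PySem.Set Int) (v : Int) (h : PySem.Set.contains seen v = true) :
    PySem.Set.add seen v = seen := by
  unfold PySem.Set.add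
  rw [if_pos h]

lemma goB_eq_goM (li1 : List (List Int)) (h1 : li1.length = 5) (h2 : ∀ r ∈ li1, r.length = 5) :
    ∀ (vs : List Int) (cnt : Int) (seen : PySem.Set Int),
      goB (posOf li1) vs cnt seen (rowsL (mB li1 seen)) (colsL (mB li1 seen))
          (d1L (mB li1 seen)) (d2L (mB li1 seen))
        = goM li1 vs cnt seen := by
  intro vs
  induction vs with
  | nil => intro cnt seen; rfl
  | cons v rest ih =>
    intro cnt seen
    simp only [goB, goM]
    by_cases hc : PySem.Set.contains seen v
    · rw [if_pos hc, add_of_contains seen v hc]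
      by_cases ht : tB (rowsL (mB li1 seen)) (colsL (mB li1 seen)) (d1L (mB li1 seen)) (d2L (mB li1 seen))
      · rw [if_pos ht, if_pos ht]
      · rw [if_neg ht, if_neg ht, ih]
    · rw [if_neg hc]
      have hcr : PySem.Set.contains seen v = false := by simpa using hc
      rw [step_crux li1 h1 h2 seen v hcr]
      by_cases ht : tB (rowsL (mB li1 (PySem.Set.add seen v))) (colsL (mB li1 (PySem.Set.add seen v)))
          (d1L (mB li1 (PySem.Set.add seen v))) (d2L (mB li1 (PySem.Set.add seen v)))
      · rw [if_pos ht, if_pos ht]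
      · rw [if_neg ht, if_neg ht, ih]

-- ---------- initial states and value lists ----------

lemma mask_empty (li1 : List (List Int)) : mB li1 PySem.Set.empty = li1 := by
  have hr : maskRow PySem.Set.empty = id := funext fun r => by
    simp only [maskRow, show mOf PySem.Set.empty = id from funext fun x => rfl, List.map_id]
    rfl
  simp only [mB, hr, List.map_id]

lemma init_rows (li1 : List (List Int)) : li1.map (fun r => r.sum) = rowsL li1 := by
  unfold rowsL
  simp [List.sum_eq_foldl]

lemma init_cols (li1 : List (List Int)) :
    (PySem.List.pyRange 0 5 1).map (fun c =>
      ((PySem.List.pyRange 0 5 1).map (fun k => PySem.List.pyGetD (PySem.List.pyGetD li1 k []) c 0)).sum)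
    = colsL li1 := by
  unfold colsL
  simp [List.sum_eq_foldl, List.foldl_map]

lemma init_d1 (li1 : List (List Int)) :
    ((PySem.List.pyRange 0 5 1).map (fun k => PySem.List.pyGetD (PySem.List.pyGetD li1 k []) k 0)).sum
    = d1L li1 := by
  unfold d1L
  simp [List.sum_eq_foldl, List.foldl_map]

lemma init_d2 (li1 : List (List Int)) :
    ((PySem.List.pyRange 0 5 1).map (fun k => PySem.List.pyGetD (PySem.List.pyGetD li1 k []) (4 - k) 0)).sum
    = d2L li1 := by
  unfold d2L
  simp [List.sum_eq_foldl, List.foldl_map]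

lemma vals_eq (li2 : List (List Int)) (h3 : li2.length = 5) (h4 : ∀ r ∈ li2, r.length = 5) :
    ((PySem.List.pyRange 0 5 1).flatMap (fun i => (PySem.List.pyRange 0 5 1).map (fun j => (i, j)))).map
        (fun ij => PySem.List.pyGetD (PySem.List.pyGetD li2 ij.1 []) ij.2 0)
      = li2.flatMap (fun r => r) := by
  rw [List.map_flatMap]
  have hstep : ∀ i ∈ PySem.List.pyRange 0 5 1,
      ((PySem.List.pyRange 0 5 1).map (fun j => (i, j))).map
          (fun ij => PySem.List.pyGetD (PySem.List.pyGetD li2 ij.1 []) ij.2 0)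
        = PySem.List.pyGetD li2 i [] := by
    intro i hi
    rw [PySem.List.mem_pyRange_one] at hi
    have hrow : PySem.List.pyGetD li2 i [] ∈ li2 :=
      PySem.List.pyGetD_mem li2 [] (by constructor <;> omega)
    have hlen : PySem.List.len (PySem.List.pyGetD li2 i []) = 5 := by
      simp [PySem.List.len, h4 _ hrow]
    rw [List.map_map]
    calc ((PySem.List.pyRange 0 5 1).map
            ((fun ij => PySem.List.pyGetD (PySem.List.pyGetD li2 ij.1 []) ij.2 0) ∘ fun j => (i, j)))
        = (PySem.List.pyRange 0 (PySem.List.len (PySem.List.pyGetD li2 i [])) 1).map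
            (fun j => PySem.List.pyGetD (PySem.List.pyGetD li2 i []) j 0) := by rw [hlen]; rfl
      _ = PySem.List.pyGetD li2 i [] := PySem.List.map_pyGetD_pyRange_zero _ _
  calc (PySem.List.pyRange 0 5 1).flatMap (fun i =>
          ((PySem.List.pyRange 0 5 1).map (fun j => (i, j))).map
            (fun ij => PySem.List.pyGetD (PySem.List.pyGetD li2 ij.1 []) ij.2 0))
      = (PySem.List.pyRange 0 5 1).flatMap (fun i => PySem.List.pyGetD li2 i []) := by
        simp only [List.flatMap_def]
        exact congrArg List.flatten (List.map_congr_left hstep)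
    _ = li2.flatMap (fun r => r) := by
        have h5 : PySem.List.pyRange 0 5 1 = PySem.List.pyRange 0 (PySem.List.len li2) 1 := by
          simp [PySem.List.len, h3]
        simp only [List.flatMap_def, h5, PySem.List.map_pyGetD_pyRange_zero, List.map_id_fun', id]

-- ===== VERDICT (by name: the statement is the Claim_ definition above) =====
theorem check_bingo_spec : Claim_equal_check_bingo := by
  intro li1 li2 _hdom hpre
  obtain ⟨h1, h2, h3, h4⟩ := hpre
  unfold Spec_check_bingo check_bingo check_bingo_alt
  have key := goA_eq_goM li1 li2 h1 h2
    ((PySem.List.pyRange 0 5 1).flatMap (fun i => (PySem.List.pyRange 0 5 1).map (fun j => (i, j))))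
    0 PySem.Set.empty
  rw [mask_empty] at key
  rw [key, vals_eq li2 h3 h4]
  rw [init_rows, init_cols, init_d1, init_d2]
  have := goB_eq_goM li1 h1 h2 (li2.flatMap (fun r => r)) 0 PySem.Set.empty
  rw [mask_empty] at this
  rw [this]
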